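-- pv_equiv track=rewrite | github.com/akikuno/DAJIN2 | src/DAJIN2/utils/midsv_handler.py | find_n_boundaries
-- ===== SOURCE A (Python) =====
-- def is_n_tag(tag: str) -> bool:
--     return tag.endswith("N") or tag.endswith("n")
--
-- def find_n_boundaries(midsv_tags: list[str]) -> tuple[int, int]:
--     """Find the boundaries of contiguous Ns which aren't at the ends."""
--
--     # Find the left boundary
--     left_idx_n = 0
--     for char in midsv_tags:
--         if not is_n_tag(char):
--             break
--         left_idx_n += 1
--
--     # Find the right boundary
--     right_idx_n = len(midsv_tags) - 1
--     for char in reversed(midsv_tags):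
--         if not is_n_tag(char):
--             break
--         right_idx_n -= 1
--
--     return left_idx_n - 1, right_idx_n + 1
-- ===== SOURCE B (Python) =====
-- def is_n_tag(tag: str) -> bool:
--     return tag.endswith("N") or tag.endswith("n")
--
-- def find_n_boundaries(midsv_tags: list[str]) -> tuple[int, int]:
--     """Find the boundaries of contiguous Ns which aren't at the ends."""
--     positions = [i for i, tag in enumerate(midsv_tags) if not is_n_tag(tag)]
--     if positions:
--         return positions[0] - 1, positions[-1] + 1
--     return len(midsv_tags) - 1, 0
-- ===== Notes on version B (the rewrite author's own statement) =====
-- stated objective: simpler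
-- what changed: Replaced the two directional early-stopping scans (forward and over reversed input) by one pass building the index list of non-N tags and reading its first and last element, with a single fallback for the all-N/empty case.
import Mathlib
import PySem

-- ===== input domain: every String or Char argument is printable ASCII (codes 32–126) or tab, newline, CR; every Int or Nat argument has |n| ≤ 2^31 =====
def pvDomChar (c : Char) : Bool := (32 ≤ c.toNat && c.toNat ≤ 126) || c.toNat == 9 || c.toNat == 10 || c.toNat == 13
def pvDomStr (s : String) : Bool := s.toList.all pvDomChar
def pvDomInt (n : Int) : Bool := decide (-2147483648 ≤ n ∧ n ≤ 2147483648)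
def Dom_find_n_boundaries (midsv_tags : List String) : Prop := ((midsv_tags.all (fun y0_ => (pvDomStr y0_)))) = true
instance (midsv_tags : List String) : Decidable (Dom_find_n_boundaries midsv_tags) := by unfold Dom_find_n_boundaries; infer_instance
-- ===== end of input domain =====

-- B replaces A's two directional early-stopping scans by one pass collecting the
-- indices of non-N tags and reading the first and last entry (objective: simpler).

-- ===== PORT A =====
def is_n_tag (tag : String) : Bool :=
  PySem.Str.endswith tag "N" || PySem.Str.endswith tag "n"

-- A's first loop: count leading N-tags, stopping at the first non-N tag
def pvLeftScan : List String → Int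
  | [] => 0
  | t :: ts => if !is_n_tag t then 0 else 1 + pvLeftScan ts

-- A's second loop: start from len-1 and decrement while the reversed list has N-tags
def pvRightScan : Int → List String → Int
  | acc, [] => acc
  | acc, t :: ts => if !is_n_tag t then acc else pvRightScan (acc - 1) ts

def find_n_boundaries (midsv_tags : List String) : Int × Int :=
  (pvLeftScan midsv_tags - 1,
   pvRightScan ((midsv_tags.length : Int) - 1) midsv_tags.reverse + 1)

-- ===== PORT B =====
-- enumerate(midsv_tags) with Int indices
def pvEnum (i : Int) : List String → List (Int × String)
  | [] => []
  | t :: ts => (i, t) :: pvEnum (i + 1) ts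

def find_n_boundaries_alt (midsv_tags : List String) : Int × Int :=
  let positions := ((pvEnum 0 midsv_tags).filter (fun p => !is_n_tag p.2)).map Prod.fst
  match positions with
  | [] => ((midsv_tags.length : Int) - 1, 0)
  | p :: ps => (p - 1, (p :: ps).getLast (by simp) + 1)

-- ===== PRECONDITION & SPEC =====
def Spec_find_n_boundaries (midsv_tags : List String) (out : Int × Int) : Prop := out = find_n_boundaries_alt midsv_tags
instance (midsv_tags : List String) (out : Int × Int) : Decidable (Spec_find_n_boundaries midsv_tags out) := by unfold Spec_find_n_boundaries; infer_instance

-- ===== CLAIM (what is proved, stated in full; the proofs are below) =====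
def Claim_equal_find_n_boundaries : Prop := ∀ (midsv_tags : List String), Dom_find_n_boundaries midsv_tags → Spec_find_n_boundaries midsv_tags (find_n_boundaries midsv_tags)

-- ===== LEMMAS AND PROOFS =====

def pvPos (i : Int) (l : List String) : List Int :=
  ((pvEnum i l).filter (fun p => !is_n_tag p.2)).map Prod.fst

theorem pvPos_nil (i : Int) : pvPos i [] = [] := rfl

theorem pvPos_cons (i : Int) (t : String) (ts : List String) :
    pvPos i (t :: ts) = if is_n_tag t then pvPos (i + 1) ts else i :: pvPos (i + 1) ts := by
  simp only [pvPos, pvEnum, List.filter]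
  cases h : is_n_tag t <;> simp

theorem pvPos_append_singleton (i : Int) (l : List String) (t : String) :
    pvPos i (l ++ [t]) =
      pvPos i l ++ (if is_n_tag t then [] else [i + l.length]) := by
  induction l generalizing i with
  | nil =>
      rw [List.nil_append, pvPos_cons]
      cases h : is_n_tag t <;> simp [pvPos_nil]
  | cons a as ih =>
      rw [List.cons_append, pvPos_cons, pvPos_cons, ih]
      have hc : (i + (((a :: as).length : Nat) : Int)) = (i + 1) + ((as.length : Nat) : Int) := by
        push_cast [List.length_cons]; ring
      rw [hc]
      cases h : is_n_tag a <;> simp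

theorem pvLeftScan_eq (l : List String) :
    ∀ i : Int, pvLeftScan l + i = (pvPos i l).head?.getD (i + l.length) := by
  induction l with
  | nil => intro i; simp [pvLeftScan, pvPos_nil]
  | cons t ts ih =>
      intro i
      rw [pvPos_cons]
      by_cases h : is_n_tag t = true
      · rw [if_pos h]
        have h1 : pvLeftScan (t :: ts) = 1 + pvLeftScan ts := by simp [pvLeftScan, h]
        have h2 : (i + (((t :: ts).length : Nat) : Int)) = (i + 1) + (ts.length : Int) := by
          push_cast [List.length_cons]; ring
        rw [h1, h2, ← ih (i + 1)]; ring
      · rw [if_neg h]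
        rw [Bool.not_eq_true] at h
        have h1 : pvLeftScan (t :: ts) = 0 := by simp [pvLeftScan, h]
        simp [h1]

theorem pvRightScan_eq (l : List String) :
    ∀ i : Int, pvRightScan (i + l.length - 1) l.reverse = (pvPos i l).getLast?.getD (i - 1) := by
  induction l using List.reverseRecOn with
  | nil => intro i; simp [pvRightScan, pvPos_nil]
  | append_singleton as t ih =>
      intro i
      have hlen : (((as ++ [t]).length : Nat) : Int) = (as.length : Int) + 1 := by simp
      have hrev : (as ++ [t]).reverse = t :: as.reverse := by simp
      rw [pvPos_append_singleton, hrev, hlen]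
      by_cases h : is_n_tag t = true
      · have h1 : pvRightScan (i + ((as.length : Int) + 1) - 1) (t :: as.reverse)
            = pvRightScan (i + (as.length : Int) - 1) as.reverse := by
          simp only [pvRightScan, h, Bool.not_true, Bool.false_eq_true, if_false]
          congr 1
          ring
        rw [h1, if_pos h, List.append_nil, ih i]
      · rw [Bool.not_eq_true] at h
        have h1 : pvRightScan (i + ((as.length : Int) + 1) - 1) (t :: as.reverse)
            = i + (as.length : Int) := by
          simp only [pvRightScan, h, Bool.not_false, if_true]
          ring
        rw [h1, if_neg (by simp [h]), List.getLast?_append]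
        simp

-- find_n_boundaries_alt expressed through pvPos
theorem alt_eq (l : List String) :
    find_n_boundaries_alt l =
      match pvPos 0 l with
      | [] => ((l.length : Int) - 1, 0)
      | p :: ps => (p - 1, (p :: ps).getLast (by simp) + 1) := rfl

-- ===== VERDICT (by name: the statement is the Claim_ definition above) =====
theorem find_n_boundaries_spec : Claim_equal_find_n_boundaries := by
  intro l _
  show find_n_boundaries l = find_n_boundaries_alt l
  rw [alt_eq]
  have hleft := pvLeftScan_eq l 0
  have hright := pvRightScan_eq l 0
  rw [zero_add] at hright
  cases hp : pvPos 0 l with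
  | nil =>
      rw [hp] at hleft hright
      simp only [List.head?_nil, Option.getD_none, List.getLast?_nil] at hleft hright
      simp only [find_n_boundaries, hright, Prod.mk.injEq]
      constructor <;> omega
  | cons p ps =>
      rw [hp] at hleft hright
      have hlast : (p :: ps).getLast? = some ((p :: ps).getLast (by simp)) := by
        rw [List.getLast?_eq_some_getLast]
      rw [hlast, Option.getD_some] at hright
      simp only [List.head?_cons, Option.getD_some] at hleft
      simp only [find_n_boundaries, Prod.mk.injEq]
      constructor
      · omega
      · exact congrArg (fun z => z + 1) hright
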